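-- pv_equiv track=rewrite | github.com/Vincent-Zhenhao-ZHAO/CodeChallenge | problems/PasswordChecker/SliceStringMethod.py | Solution
-- ===== SOURCE A (Python) =====
-- def Solution(S):
--     def checkcurrent(S):
--         capital = False
--         currentlen = 0
--         for count in range(0,len(S)):
--             if S[count].isupper():
--                 capital = True
--                 currentlen += 1
--             elif S[count].isdigit():
--                 if capital:
--                     return currentlen,S[count:]
--                 elif count == 0:
--                     return 0,S[count+1:]
--                 else:
--                     return 0,S[count:]
--             else:
--                 currentlen += 1
--         if capital == False:
--             return 0,S[count:]
--         else:
--             return currentlen,S[count:]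
--
--     max = -1
--     slicedstring = S
--     while slicedstring:
--         if not len(slicedstring) ==1:
--             current,slicedstring = checkcurrent(slicedstring)
--             if current != 0 and current > max:
--                 max = current
--         else:
--             if slicedstring.isupper():
--                 if max < 1:
--                     max = 1
--             slicedstring = ''
--
--
--     return max
-- ===== SOURCE B (Python) =====
-- def Solution(S):
--     best = -1
--     runlen = 0
--     has_cap = False
--     for c in S:
--         if c.isdigit():
--             if has_cap and runlen > best:
--                 best = runlen
--             runlen = 0
--             has_cap = False
--         else:
--             runlen += 1
--             if c.isupper():
--                 has_cap = True
--     if has_cap and runlen > best: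
--         best = runlen
--     return best
-- ===== Notes on version B (the rewrite author's own statement) =====
-- stated objective: faster
-- what changed: B replaces A's repeated slice-and-rescan helper loop (which re-slices the remaining string at every digit) with a single forward pass maintaining (best, current run length, capital-seen) state.
import Mathlib
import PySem

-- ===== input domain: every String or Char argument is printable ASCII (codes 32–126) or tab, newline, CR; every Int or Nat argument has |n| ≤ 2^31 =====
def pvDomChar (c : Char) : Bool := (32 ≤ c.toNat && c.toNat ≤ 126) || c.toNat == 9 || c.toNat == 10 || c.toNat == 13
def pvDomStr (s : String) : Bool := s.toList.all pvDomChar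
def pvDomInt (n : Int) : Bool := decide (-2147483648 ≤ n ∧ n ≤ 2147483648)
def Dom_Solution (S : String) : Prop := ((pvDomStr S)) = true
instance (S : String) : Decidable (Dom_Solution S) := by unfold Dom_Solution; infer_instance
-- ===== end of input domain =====

-- B replaces A's repeated slice-and-rescan helper with one forward pass over the characters (objective: faster).

-- ===== PORT A =====
-- checkcurrent's for-loop over range(0,len(S)) with indexing S[count]: `rem` is S[count:] (invariant), slices taken from `orig`
def checkAGo (orig rem : List Char) (count : Nat) (capital : Bool) (currentlen : Int) : Int × List Char :=
  match rem with
  | [] =>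
    -- after the for-loop, count holds len(S)-1 (the last index), hence the `count - 1`
    if capital = false then (0, orig.drop (count - 1)) else (currentlen, orig.drop (count - 1))
  | c :: rest =>
    if PySem.Chars.isupper c then checkAGo orig rest (count + 1) true (currentlen + 1)
    else if PySem.Chars.isdigit c then
      (if capital then (currentlen, orig.drop count)
       else if count = 0 then ((0 : Int), orig.drop (count + 1))
       else ((0 : Int), orig.drop count))
    else checkAGo orig rest (count + 1) capital (currentlen + 1)

-- the while-loop; fuel = |S|+1 suffices because checkcurrent always strictly shortens a string of length ≥ 2
def loopA : Nat → List Char → Int → Int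
  | 0, _, mx => mx
  | _ + 1, [], mx => mx
  | fuel + 1, [c], mx =>
      -- len(slicedstring) == 1 branch
      loopA fuel [] (if PySem.Chars.isupper c ∧ mx < 1 then 1 else mx)
  | fuel + 1, c1 :: c2 :: t, mx =>
      let r := checkAGo (c1 :: c2 :: t) (c1 :: c2 :: t) 0 false 0
      loopA fuel r.2 (if r.1 ≠ 0 ∧ r.1 > mx then r.1 else mx)

def Solution (S : String) : Int := loopA (S.toList.length + 1) S.toList (-1)

-- ===== PORT B =====
-- state (best, runlen, has_cap)
def stepB (st : Int × Int × Bool) (c : Char) : Int × Int × Bool :=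
  if PySem.Chars.isdigit c then
    (if st.2.2 ∧ st.2.1 > st.1 then st.2.1 else st.1, 0, false)
  else
    (st.1, st.2.1 + 1, st.2.2 || PySem.Chars.isupper c)

-- the final `if has_cap and runlen > best` check of Source B
def finishB (st : Int × Int × Bool) : Int :=
  if st.2.2 ∧ st.2.1 > st.1 then st.2.1 else st.1

def Solution_alt (S : String) : Int :=
  finishB (S.toList.foldl stepB (-1, 0, false))

-- ===== PRECONDITION & SPEC =====
def Spec_Solution (S : String) (out : Int) : Prop := out = Solution_alt S
instance (S : String) (out : Int) : Decidable (Spec_Solution S out) := by unfold Spec_Solution; infer_instance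

-- ===== CLAIM (what is proved, stated in full; the proofs are below) =====
def Claim_equal_Solution : Prop := ∀ (S : String), Dom_Solution S → Spec_Solution S (Solution S)

-- ===== LEMMAS AND PROOFS =====

theorem digit_not_upper (c : Char) (h : PySem.Chars.isdigit c = true) : PySem.Chars.isupper c = false := by
  simp only [PySem.Chars.isdigit, PySem.Chars.isupper, Bool.and_eq_true, Bool.and_eq_false_iff,
    decide_eq_true_eq, decide_eq_false_iff_not, not_le, Char.le_def,
    UInt32.le_iff_toNat_le] at *
  have h9 : ('9' : Char).val.toNat = 57 := rfl
  have hA : ('A' : Char).val.toNat = 65 := rfl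
  omega

theorem loopA_nil (fuel : Nat) (mx : Int) : loopA fuel [] mx = mx := by
  cases fuel <;> rfl

theorem foldl_nodigit (l : List Char) (hl : ∀ c ∈ l, PySem.Chars.isdigit c = false) :
    ∀ (m r : Int) (h : Bool),
      l.foldl stepB (m, r, h) = (m, r + (l.length : Int), h || l.any PySem.Chars.isupper) := by
  induction l with
  | nil => intro m r h; simp
  | cons c rest ih =>
    intro m r h
    have hc := hl c (by simp)
    simp only [List.foldl_cons, stepB, hc]
    rw [ih (fun x hx => hl x (by simp [hx]))]
    simp only [List.length_cons, List.any_cons, if_false, Bool.false_eq_true, Bool.or_assoc]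
    refine Prod.ext rfl (Prod.ext ?_ rfl)
    push_cast; ring

theorem checkAGo_nodigit (rem : List Char) (hrem : ∀ c ∈ rem, PySem.Chars.isdigit c = false) :
    ∀ (orig : List Char) (count : Nat) (cap : Bool) (cur : Int),
      checkAGo orig rem count cap cur =
        (if cap || rem.any PySem.Chars.isupper then cur + (rem.length : Int) else 0,
         orig.drop (count + rem.length - 1)) := by
  induction rem with
  | nil =>
    intro orig count cap cur
    cases cap <;> simp [checkAGo]
  | cons c rest ih =>
    intro orig count cap cur
    have hc := hrem c (by simp)
    have ih' := ih (fun x hx => hrem x (by simp [hx]))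
    by_cases hu : PySem.Chars.isupper c = true
    · simp only [checkAGo, hu, if_true, ih', List.any_cons, Bool.true_or, Bool.or_true,
        List.length_cons]
      refine Prod.ext ?_ ?_
      · simp only; push_cast; ring
      · simp only; congr 1; omega
    · have hu' : PySem.Chars.isupper c = false := by simpa using hu
      simp only [checkAGo, hu', hc, Bool.false_eq_true, if_false, ih', List.any_cons,
        Bool.false_or, List.length_cons]
      refine Prod.ext ?_ ?_
      · simp only
        by_cases h2 : (cap || rest.any PySem.Chars.isupper) = true <;> simp [h2] <;> ring
      · simp only; congr 1; omega

theorem checkAGo_digit (pre : List Char) (hpre : ∀ c ∈ pre, PySem.Chars.isdigit c = false) :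
    ∀ (d : Char) (suf orig : List Char) (count : Nat) (cap : Bool) (cur : Int),
      PySem.Chars.isdigit d = true →
      checkAGo orig (pre ++ d :: suf) count cap cur =
        (if cap || pre.any PySem.Chars.isupper then
          ((cur + (pre.length : Int), orig.drop (count + pre.length)) : Int × List Char)
         else if count + pre.length = 0 then (0, orig.drop (count + pre.length + 1))
         else (0, orig.drop (count + pre.length))) := by
  induction pre with
  | nil =>
    intro d suf orig count cap cur hd
    have hdu : PySem.Chars.isupper d = false := digit_not_upper d hd
    simp only [List.nil_append, checkAGo, hdu, Bool.false_eq_true, if_false, hd, if_true,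
      List.any_nil, Bool.or_false, List.length_nil, Nat.add_zero]
    cases cap <;> simp
  | cons c rest ih =>
    intro d suf orig count cap cur hd
    have hc := hpre c (by simp)
    have ih' := ih (fun x hx => hpre x (by simp [hx])) d suf orig
    by_cases hu : PySem.Chars.isupper c = true
    · simp only [List.cons_append, checkAGo, hu, if_true, ih' (count+1) true (cur+1) hd,
        List.any_cons, Bool.true_or, Bool.or_true, List.length_cons, if_true]
      refine Prod.ext ?_ ?_ <;> simp only
      · push_cast; ring
      · congr 1; omega
    · have hu' : PySem.Chars.isupper c = false := by simpa using hu
      simp only [List.cons_append, checkAGo, hu', hc, Bool.false_eq_true, if_false,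
        ih' (count+1) cap (cur+1) hd, List.any_cons, Bool.false_or, List.length_cons]
      have harith : count + 1 + rest.length = count + (rest.length + 1) := by omega
      have hne : ¬ (count + (rest.length + 1) = 0) := by omega
      by_cases h2 : (cap || rest.any PySem.Chars.isupper) = true
      · simp only [h2, if_true, harith]
        refine Prod.ext ?_ rfl
        simp only; push_cast; ring
      · have h2' : (cap || rest.any PySem.Chars.isupper) = false := by simpa using h2
        simp only [h2', Bool.false_eq_true, if_false, harith, hne]

theorem loopA_eq (fuel : Nat) :
    ∀ (s : List Char) (m : Int), s.length < fuel →
      loopA fuel s m = finishB (s.foldl stepB (m, 0, false)) := by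
  induction fuel with
  | zero => intro s m h; exact absurd h (Nat.not_lt_zero _)
  | succ fuel ih =>
    intro s m hs
    match s with
    | [] => simp [loopA, finishB]
    | [c] =>
      rw [show loopA (fuel + 1) [c] m =
        loopA fuel [] (if PySem.Chars.isupper c ∧ m < 1 then 1 else m) from rfl, loopA_nil]
      by_cases hd : PySem.Chars.isdigit c = true
      · have hu := digit_not_upper c hd
        simp [stepB, hd, finishB, hu]
      · have hd' : PySem.Chars.isdigit c = false := by simpa using hd
        simp only [List.foldl_cons, List.foldl_nil, stepB, hd', Bool.false_eq_true, if_false,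
          finishB, Bool.false_or]
        by_cases hu : PySem.Chars.isupper c = true
        · simp only [hu, true_and]; split_ifs <;> omega
        · simp [hu]
    | c1 :: c2 :: t =>
      have hlen2 : 2 ≤ (c1 :: c2 :: t).length := by simp
      have hA : loopA (fuel + 1) (c1 :: c2 :: t) m =
          loopA fuel (checkAGo (c1 :: c2 :: t) (c1 :: c2 :: t) 0 false 0).2
            (if (checkAGo (c1 :: c2 :: t) (c1 :: c2 :: t) 0 false 0).1 ≠ 0 ∧
                (checkAGo (c1 :: c2 :: t) (c1 :: c2 :: t) 0 false 0).1 > m then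
              (checkAGo (c1 :: c2 :: t) (c1 :: c2 :: t) 0 false 0).1 else m) := rfl
      by_cases hd1 : PySem.Chars.isdigit c1 = true
      · -- first character is a digit: checkcurrent returns (0, S[1:])
        have hck := checkAGo_digit [] (by simp) c1 (c2 :: t) (c1 :: c2 :: t) 0 false 0 hd1
        simp only [List.nil_append, List.any_nil, Bool.or_false, Bool.false_eq_true, if_false,
          List.length_nil, Nat.add_zero, if_true] at hck
        rw [hA, hck]
        simp only [ne_eq, not_true_eq_false, false_and, if_false, List.drop_succ_cons,
          List.drop_zero]
        rw [ih (c2 :: t) m (by simp at hs ⊢; omega)]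
        have hstep : stepB (m, 0, false) c1 = (m, 0, false) := by simp [stepB, hd1]
        simp only [List.foldl_cons, hstep]
      · -- first character is not a digit: split off the maximal digit-free prefix
        have hd1' : PySem.Chars.isdigit c1 = false := by simpa using hd1
        set s' := c1 :: c2 :: t with hs'
        set q : Char → Bool := fun c => !PySem.Chars.isdigit c with hq
        have hsplit : s'.takeWhile q ++ s'.dropWhile q = s' := List.takeWhile_append_dropWhile
        have hpre : ∀ c ∈ s'.takeWhile q, PySem.Chars.isdigit c = false := by
          intro c hc
          have := List.mem_takeWhile_imp hc
          simpa [hq] using this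
        cases hu : s'.dropWhile q with
        | nil =>
          -- no digit anywhere in the string
          have hall : ∀ c ∈ s', PySem.Chars.isdigit c = false := by
            intro c hc
            have := List.dropWhile_eq_nil_iff.mp hu c hc
            simpa [hq] using this
          have hck := checkAGo_nodigit s' hall s' 0 false 0
          simp only [Bool.false_or, zero_add] at hck
          rw [hA, hck]
          have hne : s' ≠ [] := by simp [hs']
          have hdrop : s'.drop (s'.length - 1) = [s'.getLast hne] := List.drop_length_sub_one hne
          simp only [hdrop]
          have hfoldl := foldl_nodigit s' hall m 0 false
          simp only [Bool.false_or, zero_add] at hfoldl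
          rw [hfoldl]
          -- both sides reduce to the same maximum
          have hlast : s'.getLast hne ∈ s' := List.getLast_mem hne
          set mx' : Int := if (if s'.any PySem.Chars.isupper then (s'.length : Int) else 0) ≠ 0 ∧
              (if s'.any PySem.Chars.isupper then (s'.length : Int) else 0) > m
            then (if s'.any PySem.Chars.isupper then (s'.length : Int) else 0) else m with hmx'
          have hstep1 : loopA fuel [s'.getLast hne] mx' =
              (if PySem.Chars.isupper (s'.getLast hne) ∧ mx' < 1 then 1 else mx') := by
            obtain ⟨f, rfl⟩ : ∃ f, fuel = f + 1 := ⟨fuel - 1, by simp at hs; omega⟩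
            rw [show loopA (f + 1) [s'.getLast hne] mx' =
              loopA f [] (if PySem.Chars.isupper (s'.getLast hne) ∧ mx' < 1 then 1 else mx')
              from rfl, loopA_nil]
          rw [hstep1]
          by_cases hany : s'.any PySem.Chars.isupper = true
          · have hlenpos : (2 : Int) ≤ (s'.length : Int) := by exact_mod_cast hlen2
            have hmxbig : ¬ (mx' < 1) := by
              rw [hmx']
              simp only [hany, if_true]
              split_ifs with h1 <;> omega
            rw [if_neg (fun h => hmxbig h.2), hmx']
            simp only [hany, if_true, finishB, true_and, ne_eq, gt_iff_lt]
            split_ifs <;> omega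
          · have hany' : s'.any PySem.Chars.isupper = false := by simpa using hany
            have hlu : PySem.Chars.isupper (s'.getLast hne) = false := by
              by_contra hcon
              have : PySem.Chars.isupper (s'.getLast hne) = true := by simpa using hcon
              have := List.any_eq_true.mpr ⟨_, hlast, this⟩
              rw [hany'] at this; exact absurd this (by simp)
            simp [hany', hlu, hmx', finishB]
        | cons d u' =>
          have hd : PySem.Chars.isdigit d = true := by
            have h2 := List.head_dropWhile_not q (l := s') (by simp [hu])
            simp only [hu, List.head_cons] at h2
            simpa [hq] using h2
          set pre := s'.takeWhile q with hpredef
          have hsplit' : s' = pre ++ d :: u' := by rw [← hsplit, hu]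
          have hplen : 1 ≤ pre.length := by
            rw [hpredef, hs', List.takeWhile_cons_of_pos (by simp [hq, hd1'])]
            simp
          have hck0 : checkAGo s' s' 0 false 0 = checkAGo s' (pre ++ d :: u') 0 false 0 := by
            rw [← hsplit']
          have hck := checkAGo_digit pre hpre d u' s' 0 false 0 hd
          simp only [Bool.false_or, zero_add] at hck
          have hdropk : s'.drop pre.length = d :: u' := by
            rw [hsplit', List.drop_left]
          have hkne : ¬ (pre.length = 0) := by omega
          rw [hA, hck0, hck]
          simp only [hkne, if_false, hdropk]
          -- both branches recurse on d :: u' with the updated maximum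
          have hlrec : (d :: u').length < fuel := by
            have : s'.length = pre.length + (d :: u').length := by
              rw [hsplit']; simp
            simp at hs; omega
          have hklpos : (1 : Int) ≤ (pre.length : Int) := by exact_mod_cast hplen
          have hbfold := foldl_nodigit pre hpre m 0 false
          simp only [Bool.false_or, zero_add] at hbfold
          rw [hsplit', List.foldl_append, hbfold]
          by_cases hcap : pre.any PySem.Chars.isupper = true
          · simp only [hcap, if_true]
            have hne0 : ¬ ((pre.length : Int) = 0) := by omega
            simp only [ne_eq, hne0, not_false_eq_true, true_and, gt_iff_lt]
            rw [ih _ _ hlrec]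
            have hstep : stepB (m, (pre.length : Int), true) d =
                (if (pre.length : Int) > m then (pre.length : Int) else m, 0, false) := by
              simp [stepB, hd]
            simp only [List.foldl_cons, hstep]
            rw [show stepB ((if m < (pre.length : Int) then (pre.length : Int) else m), 0, false) d =
              ((if m < (pre.length : Int) then (pre.length : Int) else m), 0, false) from by
                simp [stepB, hd]]
          · have hcap' : pre.any PySem.Chars.isupper = false := by simpa using hcap
            simp only [hcap', Bool.false_eq_true, if_false, ne_eq, not_true_eq_false, false_and,
              if_false]
            rw [ih _ _ hlrec]
            have hstep : stepB (m, (pre.length : Int), false) d = (m, 0, false) := by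
              simp [stepB, hd]
            simp only [List.foldl_cons, hstep]
            rw [show stepB (m, 0, false) d = (m, 0, false) from by simp [stepB, hd]]

-- ===== VERDICT (by name: the statement is the Claim_ definition above) =====
theorem Solution_spec : Claim_equal_Solution := by
  intro S _
  unfold Spec_Solution Solution Solution_alt
  exact loopA_eq _ _ _ (Nat.lt_succ_self _)
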